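-- pv_equiv track=rewrite | github.com/mediagrowthmkt-debug/LP-EMPRESAS-QUE-FATURAM-ACIMA-DE-MIL-REAIS-POR-M-S | gerar_versoes_google_meta.py | fix_asset_paths
-- ===== SOURCE A (Python) =====
-- ASSET_PREFIXES = [
--     'favicon.png',
--     'logo amcc/',
--     'fotos-equipe/',
--     'capas/',
--     'videos/',
--     'parceiros/',
-- ]
--
-- def fix_asset_paths(html):
--     """Adjust asset paths to go one level up (../)"""
--     for prefix in ASSET_PREFIXES:
--         # Handle src="prefix" and href="prefix" and url('prefix')
--         # Avoid double-fixing already relative paths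
--         # src="logo amcc/..." -> src="../logo amcc/..."
--         html = html.replace(f'src="{prefix}', f'src="../{prefix}')
--         html = html.replace(f"src='{prefix}", f"src='../{prefix}")
--         html = html.replace(f'href="{prefix}', f'href="../{prefix}')
--         html = html.replace(f"href='{prefix}", f"href='../{prefix}")
--         html = html.replace(f"url('{prefix}", f"url('../{prefix}")
--         html = html.replace(f'url("{prefix}', f'url("../{prefix}')
--         html = html.replace(f'url({prefix}', f'url(../{prefix}')
--         # srcset
--         html = html.replace(f'srcset="{prefix}', f'srcset="../{prefix}')
--         html = html.replace(f"srcset='{prefix}", f"srcset='../{prefix}")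
--         # poster
--         html = html.replace(f'poster="{prefix}', f'poster="../{prefix}')
--     return html
-- ===== SOURCE B (Python) =====
-- import re
--
-- ASSET_PREFIXES = [
--     'favicon.png',
--     'logo amcc/',
--     'fotos-equipe/',
--     'capas/',
--     'videos/',
--     'parceiros/',
-- ]
--
-- _CONTEXTS = ['src="', "src='", 'href="', "href='", "url('", 'url("', 'url(', 'srcset="', "srcset='", 'poster="']
--
-- def fix_asset_paths(html):
--     """Adjust asset paths to go one level up (../)"""
--     ctx_alt = '|'.join(re.escape(c) for c in _CONTEXTS)
--     for prefix in ASSET_PREFIXES: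
--         pattern = re.compile('(' + ctx_alt + ')' + re.escape(prefix))
--         html = pattern.sub(lambda m: m.group(1) + '../' + prefix, html)
--     return html
-- ===== Notes on version B (the rewrite author's own statement) =====
-- stated objective: alternative
-- what changed: A runs 60 sequential whole-string str.replace passes (10 quote/attribute contexts x 6 asset prefixes); B compiles, per asset prefix, one regex alternation over the ten contexts and rewrites the HTML in a single left-to-right scan per prefix, re-emitting the matched context followed by the parent-directory marker and the prefix.
import Mathlib
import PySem

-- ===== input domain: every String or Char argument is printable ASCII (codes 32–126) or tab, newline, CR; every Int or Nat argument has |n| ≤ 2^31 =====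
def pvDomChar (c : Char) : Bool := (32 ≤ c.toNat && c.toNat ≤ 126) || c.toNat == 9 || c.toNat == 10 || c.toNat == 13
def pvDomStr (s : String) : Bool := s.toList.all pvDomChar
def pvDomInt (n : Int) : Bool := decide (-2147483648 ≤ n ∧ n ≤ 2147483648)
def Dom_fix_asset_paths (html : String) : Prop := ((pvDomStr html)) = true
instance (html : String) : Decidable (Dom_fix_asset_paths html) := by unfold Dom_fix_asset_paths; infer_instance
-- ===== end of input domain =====

-- B replaces A's 60 sequential str.replace passes by, per asset prefix, ONE left-to-right scan
-- (a compiled regex alternation over the ten attribute/quote contexts) that inserts '../' at each match — objective: alternative.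

-- ===== PORT A =====
def pvAssetPrefixes : List String :=
  ["favicon.png", "logo amcc/", "fotos-equipe/", "capas/", "videos/", "parceiros/"]

def fix_asset_paths (html : String) : String :=
  pvAssetPrefixes.foldl (fun html pre =>
    let html := PySem.Str.replace html ("src=\"" ++ pre) ("src=\"../" ++ pre)
    let html := PySem.Str.replace html ("src='" ++ pre) ("src='../" ++ pre)
    let html := PySem.Str.replace html ("href=\"" ++ pre) ("href=\"../" ++ pre)
    let html := PySem.Str.replace html ("href='" ++ pre) ("href='../" ++ pre)
    let html := PySem.Str.replace html ("url('" ++ pre) ("url('../" ++ pre)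
    let html := PySem.Str.replace html ("url(\"" ++ pre) ("url(\"../" ++ pre)
    let html := PySem.Str.replace html ("url(" ++ pre) ("url(../" ++ pre)
    let html := PySem.Str.replace html ("srcset=\"" ++ pre) ("srcset=\"../" ++ pre)
    let html := PySem.Str.replace html ("srcset='" ++ pre) ("srcset='../" ++ pre)
    let html := PySem.Str.replace html ("poster=\"" ++ pre) ("poster=\"../" ++ pre)
    html) html

-- ===== PORT B =====
-- the ten contexts, in the order of Source B's regex alternation
def pvContexts : List String :=
  ["src=\"", "src='", "href=\"", "href='", "url('", "url(\"", "url(", "srcset=\"", "srcset='", "poster=\""]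

-- (context ++ prefix, context ++ "../" ++ prefix) pairs: what the regex matches and what the sub emits
def pvPairs (p : String) : List (List Char × List Char) :=
  pvContexts.map fun c => (c.toList ++ p.toList, c.toList ++ "../".toList ++ p.toList)

-- one left-to-right pass (re.sub): at each position try the alternatives in order; on a match
-- emit the replacement and resume after the matched text, else copy one character
def pvScan (PR : List (List Char × List Char)) : Nat → List Char → List Char
  | 0, l => l
  | _+1, [] => []
  | f+1, c :: t =>
    match PR.findIdx? (fun pr => pr.1.isPrefixOf (c :: t)) with
    | some j => (PR.getD j ([], [])).2 ++ pvScan PR f ((c :: t).drop (PR.getD j ([], [])).1.length)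
    | none => c :: pvScan PR f t

def fix_asset_paths_alt (html : String) : String :=
  String.ofList <| pvAssetPrefixes.foldl (fun cs p => pvScan (pvPairs p) cs.length cs) html.toList

-- ===== PRECONDITION & SPEC =====
def Spec_fix_asset_paths (html : String) (out : String) : Prop := out = fix_asset_paths_alt html
instance (html : String) (out : String) : Decidable (Spec_fix_asset_paths html out) := by unfold Spec_fix_asset_paths; infer_instance

-- ===== CLAIM (what is proved, stated in full; the proofs are below) =====
def Claim_equal_fix_asset_paths : Prop := ∀ (html : String), Dom_fix_asset_paths html → Spec_fix_asset_paths html (fix_asset_paths html)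

-- ===== LEMMAS AND PROOFS =====

-- pat/rep projections of a pair list
def pvPat (PR : List (List Char × List Char)) (i : Nat) : List Char := (PR.getD i ([], [])).1
def pvRep (PR : List (List Char × List Char)) (i : Nat) : List Char := (PR.getD i ([], [])).2

-- a and b "clash" if one is a prefix of the other; non-clashing a never matches at the start of b ++ anything
def pvNoclash (a b : List Char) : Bool := !(a.isPrefixOf b) && !(b.isPrefixOf a)

-- side conditions making the sequential replaces equal to one simultaneous pass:
-- patterns are nonempty, mutually non-clashing, and no pattern can start strictly inside
-- a pattern occurrence or anywhere inside an emitted replacement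
def pvOK (PR : List (List Char × List Char)) : Prop :=
  ∀ i < PR.length, (pvPat PR i ≠ []) ∧
    ∀ j < PR.length,
      (i ≠ j → pvNoclash (pvPat PR i) (pvPat PR j) = true ∧ pvNoclash (pvPat PR i) (pvRep PR j) = true) ∧
      (∀ k < (pvPat PR j).length, 1 ≤ k → pvNoclash (pvPat PR i) ((pvPat PR j).drop k) = true) ∧
      (∀ k < (pvRep PR j).length, 1 ≤ k → pvNoclash (pvPat PR i) ((pvRep PR j).drop k) = true) ∧
      (∀ k < (pvPat PR i).length, 1 ≤ k →
        pvNoclash ((pvPat PR i).drop k) (pvPat PR j) = true ∧ pvNoclash ((pvPat PR i).drop k) (pvRep PR j) = true)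

-- token stream of one simultaneous pass: a matched pair (by index) or a plain character
inductive PvTok where
  | ch : Char → PvTok
  | hit : Nat → PvTok
deriving DecidableEq, Repr

def pvMark (PR : List (List Char × List Char)) : Nat → List Char → List PvTok
  | 0, _ => []
  | _+1, [] => []
  | f+1, c :: t =>
    match PR.findIdx? (fun pr => pr.1.isPrefixOf (c :: t)) with
    | some j => .hit j :: pvMark PR f ((c :: t).drop (pvPat PR j).length)
    | none => .ch c :: pvMark PR f t

-- rendering after the first K replace passes have run: hits with index < K are already replaced
def pvRenderTok (PR : List (List Char × List Char)) (K : Nat) : PvTok → List Char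
  | .ch c => [c]
  | .hit j => if j < K then pvRep PR j else pvPat PR j

def pvRender (PR : List (List Char × List Char)) (K : Nat) (toks : List PvTok) : List Char :=
  toks.flatMap (pvRenderTok PR K)

def pvChain (PR : List (List Char × List Char)) (s : List Char) : List Char :=
  PR.foldl (fun s pr => PySem.Chars.replace s pr.1 pr.2) s

-- ---- generic facts ----

theorem pv_prefix_append_cases {α : Type} (a b v : List α) (h : a <+: b ++ v) : a <+: b ∨ b <+: a := by
  rcases h with ⟨t, ht⟩
  by_cases hl : a.length ≤ b.length
  · left
    have hT : (a ++ t).take a.length = (b ++ v).take a.length := by rw [ht]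
    simp [List.take_append, Nat.sub_eq_zero_of_le hl] at hT
    rw [hT]
    exact List.take_prefix _ _
  · right
    have hT : (a ++ t).take b.length = (b ++ v).take b.length := by rw [ht]
    simp [List.take_append, Nat.sub_eq_zero_of_le (le_of_lt (Nat.lt_of_not_le hl))] at hT
    rw [← hT]
    exact List.take_prefix _ _

theorem pvNoclash_not_prefix {a b : List Char} (h : pvNoclash a b = true) (v : List Char) :
    ¬ a <+: b ++ v := by
  simp only [pvNoclash, Bool.and_eq_true, Bool.not_eq_true'] at h
  intro hp
  rcases pv_prefix_append_cases a b v hp with h1 | h1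
  · rw [(List.isPrefixOf_iff_prefix).2 h1] at h; exact absurd h.1 (by simp)
  · rw [(List.isPrefixOf_iff_prefix).2 h1] at h; exact absurd h.2 (by simp)

-- fuel/accumulator normalisation for PySem.Chars.replace.go
theorem pv_go_acc (old new : List Char) :
    ∀ f l acc, PySem.Chars.replace.go old new f l acc = acc.reverse ++ PySem.Chars.replace.go old new f l [] := by
  intro f
  induction f with
  | zero => intro l acc; simp [PySem.Chars.replace.go]
  | succ f ih =>
    intro l acc
    cases l with
    | nil => simp [PySem.Chars.replace.go]
    | cons c t =>
      simp only [PySem.Chars.replace.go]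
      split
      · rw [ih (List.drop old.length (c :: t)) (new.reverse ++ acc),
            ih (List.drop old.length (c :: t)) (new.reverse ++ [])]
        simp
      · rw [ih t (c :: acc), ih t (c :: [])]
        simp

theorem pv_go_fuel (old new : List Char) (hold : old ≠ []) :
    ∀ f f' l acc, l.length ≤ f → l.length ≤ f' →
      PySem.Chars.replace.go old new f l acc = PySem.Chars.replace.go old new f' l acc := by
  intro f
  induction f with
  | zero =>
    intro f' l acc h1 _
    have : l = [] := by cases l <;> simp_all
    subst this
    cases f' <;> simp [PySem.Chars.replace.go]
  | succ f ih =>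
    intro f' l acc h1 h2
    cases l with
    | nil => cases f' <;> simp [PySem.Chars.replace.go]
    | cons c t =>
      cases f' with
      | zero => simp at h2
      | succ f'' =>
        have hol : 1 ≤ old.length := by cases old <;> simp_all
        simp only [PySem.Chars.replace.go]
        split
        · apply ih <;> (simp only [List.length_drop, List.length_cons] at *; omega)
        · apply ih <;> (simp only [List.length_cons] at *; omega)

theorem pv_replace_nil (old new : List Char) (h : old ≠ []) :
    PySem.Chars.replace [] old new = [] := by
  simp [PySem.Chars.replace, h, PySem.Chars.replace.go]

theorem pv_replace_cons (old new : List Char) (h : old ≠ []) (c : Char) (t : List Char) :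
    PySem.Chars.replace (c :: t) old new =
      if old.isPrefixOf (c :: t) then new ++ PySem.Chars.replace ((c :: t).drop old.length) old new
      else c :: PySem.Chars.replace t old new := by
  have hol : 1 ≤ old.length := by cases old <;> simp_all
  simp only [PySem.Chars.replace, List.isEmpty_iff, h, if_false, List.length_cons]
  simp only [PySem.Chars.replace.go]
  split
  · rw [pv_go_acc, pv_go_fuel old new h t.length (List.drop old.length (c :: t)).length]
    · simp
    · simp; omega
    · simp
  · rw [pv_go_acc, pv_go_fuel old new h t.length t.length t [] le_rfl le_rfl]
    simp

theorem pv_replace_head (old new rest : List Char) (h : old ≠ []) :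
    PySem.Chars.replace (old ++ rest) old new = new ++ PySem.Chars.replace rest old new := by
  cases old with
  | nil => exact absurd rfl h
  | cons p0 p' =>
    rw [List.cons_append, pv_replace_cons _ _ h]
    have hpre : (p0 :: p').isPrefixOf (p0 :: (p' ++ rest)) = true := by
      rw [List.isPrefixOf_iff_prefix]
      exact ⟨rest, by simp⟩
    rw [if_pos hpre]
    congr 1
    rw [show (p0 :: (p' ++ rest)) = (p0 :: p') ++ rest by simp]
    rw [List.drop_left]

theorem pv_replace_pass (old new : List Char) (h : old ≠ []) :
    ∀ (u : List Char), (∀ k < u.length, ∀ v, ¬ old <+: u.drop k ++ v) → ∀ rest,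
    PySem.Chars.replace (u ++ rest) old new = u ++ PySem.Chars.replace rest old new := by
  intro u
  induction u with
  | nil => intro _ rest; simp
  | cons c u' ih =>
    intro hu rest
    rw [List.cons_append, pv_replace_cons _ _ h]
    have hnp : old.isPrefixOf (c :: (u' ++ rest)) = false := by
      have := hu 0 (by simp) rest
      simp only [List.drop_zero, List.cons_append] at this
      rw [← Bool.not_eq_true, List.isPrefixOf_iff_prefix]
      exact this
    rw [hnp]
    simp only [Bool.false_eq_true, if_false, List.cons_append]
    rw [ih (fun k hk v => by simpa using hu (k + 1) (by simpa using hk) v) rest]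

theorem pv_findIdx?_spec (l : List (List Char × List Char)) (p : List Char × List Char → Bool) (j : Nat)
    (h : l.findIdx? p = some j) : ∃ hj : j < l.length, p (l[j]) = true := by
  obtain ⟨h1, h3⟩ := List.findIdx?_eq_some_iff_findIdx_eq.1 h
  subst h3
  exact ⟨h1, List.findIdx_getElem (w := h1)⟩

theorem pvPat_eq_getElem (PR : List (List Char × List Char)) (j : Nat) (hj : j < PR.length) :
    pvPat PR j = (PR[j]).1 := by
  simp [pvPat, List.getD_eq_getElem?_getD, List.getElem?_eq_getElem hj]

theorem pvRender_nil (PR : List (List Char × List Char)) (K : Nat) : pvRender PR K [] = [] := rfl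

theorem pvRender_cons (PR : List (List Char × List Char)) (K : Nat) (tok : PvTok) (toks : List PvTok) :
    pvRender PR K (tok :: toks) = pvRenderTok PR K tok ++ pvRender PR K toks := by
  simp [pvRender]

-- ---- the simultaneous-pass simulation ----

theorem pv_render_zero (PR : List (List Char × List Char)) (hOK : pvOK PR) :
    ∀ f s, s.length ≤ f → pvRender PR 0 (pvMark PR f s) = s := by
  intro f
  induction f with
  | zero =>
    intro s hs
    have : s = [] := by cases s <;> simp_all
    subst this
    simp [pvMark, pvRender_nil]
  | succ f ih =>
    intro s hs
    cases s with
    | nil => simp [pvMark, pvRender_nil]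
    | cons c t =>
      simp only [pvMark]
      cases hfind : PR.findIdx? (fun pr => pr.1.isPrefixOf (c :: t)) with
      | some j =>
        obtain ⟨hj, hpj⟩ := pv_findIdx?_spec _ _ _ hfind
        have hpre : pvPat PR j <+: c :: t := by
          rw [pvPat_eq_getElem PR j hj]
          exact (List.isPrefixOf_iff_prefix).1 hpj
        have hne : pvPat PR j ≠ [] := (hOK j hj).1
        have hlen : 1 ≤ (pvPat PR j).length := by cases h' : pvPat PR j <;> simp_all
        simp only [pvRender_cons, pvRenderTok, Nat.not_lt_zero, if_false]
        rw [show pvRender PR 0 (pvMark PR f ((c :: t).drop (pvPat PR j).length)) =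
              (c :: t).drop (pvPat PR j).length from
            ih _ (by simp only [List.length_drop, List.length_cons] at hs ⊢; omega)]
        conv_rhs => rw [← List.take_append_drop (pvPat PR j).length (c :: t)]
        congr 1
        rcases hpre with ⟨w, hw⟩
        rw [← hw, List.take_append_of_le_length le_rfl, List.take_length]
      | none =>
        simp only [pvRender_cons, pvRenderTok, List.singleton_append]
        rw [show pvRender PR 0 (pvMark PR f t) = t from ih t (by simpa using hs)]

theorem pv_suffix_no_match (PR : List (List Char × List Char)) (hOK : pvOK PR)
    (i : Nat) (hi : i < PR.length) :
    ∀ f s, s.length ≤ f → ∀ k, 1 ≤ k → k < (pvPat PR i).length →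
      ¬ (pvPat PR i).drop k <+: s →
      ∀ K, ¬ (pvPat PR i).drop k <+: pvRender PR K (pvMark PR f s) := by
  intro f
  induction f with
  | zero =>
    intro s hs k hk1 hk2 hns K
    simp only [pvMark]; rw [pvRender_nil]
    intro hp
    have : (pvPat PR i).drop k = [] := List.prefix_nil.1 hp
    have := congrArg List.length this
    simp at this
    omega
  | succ f ih =>
    intro s hs k hk1 hk2 hns K
    cases s with
    | nil =>
      simp only [pvMark]; rw [pvRender_nil]
      intro hp
      have : (pvPat PR i).drop k = [] := List.prefix_nil.1 hp
      have := congrArg List.length this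
      simp at this
      omega
    | cons c t =>
      simp only [pvMark]
      cases hfind : PR.findIdx? (fun pr => pr.1.isPrefixOf (c :: t)) with
      | some j =>
        obtain ⟨hj, hpj⟩ := pv_findIdx?_spec _ _ _ hfind
        obtain ⟨hcp, hcr⟩ := ((hOK i hi).2 j hj).2.2.2 k hk2 hk1
        simp only [pvRender_cons, pvRenderTok]
        split
        · exact pvNoclash_not_prefix hcr _
        · exact pvNoclash_not_prefix hcp _
      | none =>
        simp only [pvRender_cons, pvRenderTok, List.singleton_append]
        intro hp
        have hdropk : (pvPat PR i).drop k = (pvPat PR i)[k] :: (pvPat PR i).drop (k + 1) :=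
          List.drop_eq_getElem_cons hk2
        rw [hdropk, List.cons_prefix_cons] at hp
        obtain ⟨hc, hp'⟩ := hp
        by_cases hk3 : k + 1 < (pvPat PR i).length
        · have hns' : ¬ (pvPat PR i).drop (k + 1) <+: t := by
            intro h'
            exact hns (by rw [hdropk, hc]; exact List.cons_prefix_cons.2 ⟨rfl, h'⟩)
          exact ih t (by simpa using hs) (k + 1) (by omega) hk3 hns' K hp'
        · have hdrop_nil : (pvPat PR i).drop (k + 1) = [] := by
            rw [List.drop_eq_nil_iff]
            omega
          exact hns (by rw [hdropk, hc, hdrop_nil]; exact List.cons_prefix_cons.2 ⟨rfl, List.nil_prefix⟩)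

theorem pv_render_step (PR : List (List Char × List Char)) (hOK : pvOK PR)
    (K : Nat) (hK : K < PR.length) :
    ∀ f s, s.length ≤ f →
      PySem.Chars.replace (pvRender PR K (pvMark PR f s)) (pvPat PR K) (pvRep PR K) =
        pvRender PR (K + 1) (pvMark PR f s) := by
  have hne : pvPat PR K ≠ [] := (hOK K hK).1
  intro f
  induction f with
  | zero =>
    intro s hs
    have : s = [] := by cases s <;> simp_all
    subst this
    simp only [pvMark]; rw [pvRender_nil]
    exact pv_replace_nil _ _ hne
  | succ f ih =>
    intro s hs
    cases s with
    | nil =>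
      simp only [pvMark]; rw [pvRender_nil]
      exact pv_replace_nil _ _ hne
    | cons c t =>
      simp only [pvMark]
      cases hfind : PR.findIdx? (fun pr => pr.1.isPrefixOf (c :: t)) with
      | some j =>
        obtain ⟨hj, hpj⟩ := pv_findIdx?_spec _ _ _ hfind
        have hlenj : 1 ≤ (pvPat PR j).length := by
          have := (hOK j hj).1
          cases h' : pvPat PR j <;> simp_all
        have hdlen : ((c :: t).drop (pvPat PR j).length).length ≤ f := by
          simp only [List.length_drop, List.length_cons] at hs ⊢
          omega
        simp only [pvRender_cons, pvRenderTok]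
        by_cases hjK : j = K
        · subst hjK
          rw [if_neg (by omega), if_pos (by omega)]
          rw [pv_replace_head _ _ _ hne]
          congr 1
          exact ih _ hdlen
        · obtain ⟨hc1, hc2⟩ := ((hOK K hK).2 j hj).1 (fun h => hjK h.symm)
          have hupass : ∀ (u : List Char), (∀ k, 1 ≤ k → k < u.length → pvNoclash (pvPat PR K) (u.drop k) = true) →
              pvNoclash (pvPat PR K) u = true →
              ∀ rest, PySem.Chars.replace (u ++ rest) (pvPat PR K) (pvRep PR K) =
                u ++ PySem.Chars.replace rest (pvPat PR K) (pvRep PR K) := by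
            intro u hu hu0 rest
            apply pv_replace_pass _ _ hne u _ rest
            intro k hk v
            rcases Nat.eq_zero_or_pos k with hk0 | hk0
            · subst hk0; simpa using pvNoclash_not_prefix hu0 v
            · exact pvNoclash_not_prefix (hu k hk0 hk) v
          split
          · rw [if_pos (by omega)]
            rw [hupass (pvRep PR j) (fun k hk1 hk2 => (((hOK K hK).2 j hj).2.2.1 k hk2 hk1)) hc2 _]
            congr 1
            exact ih _ hdlen
          · rw [if_neg (by omega)]
            rw [hupass (pvPat PR j) (fun k hk1 hk2 => (((hOK K hK).2 j hj).2.1 k hk2 hk1)) hc1 _]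
            congr 1
            exact ih _ hdlen
      | none =>
        have hnK : ¬ pvPat PR K <+: c :: t := by
          have := List.findIdx?_eq_none_iff.1 hfind (PR[K]) (List.getElem_mem hK)
          rw [pvPat_eq_getElem PR K hK]
          rw [← Bool.not_eq_true, List.isPrefixOf_iff_prefix] at this
          exact this
        simp only [pvRender_cons, pvRenderTok, List.singleton_append]
        rw [pv_replace_cons _ _ hne]
        have hnp : (pvPat PR K).isPrefixOf (c :: pvRender PR K (pvMark PR f t)) = false := by
          rw [← Bool.not_eq_true, List.isPrefixOf_iff_prefix]
          intro hp
          cases hP : pvPat PR K with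
          | nil => exact hne hP
          | cons p0 p' =>
            rw [hP, List.cons_prefix_cons] at hp
            obtain ⟨hc0, hp'⟩ := hp
            cases hp'nil : p' with
            | nil =>
              apply hnK
              rw [hP, hc0, hp'nil]
              exact List.cons_prefix_cons.2 ⟨rfl, List.nil_prefix⟩
            | cons q0 q' =>
              have hlen2 : 1 < (pvPat PR K).length := by rw [hP, hp'nil]; simp only [List.length_cons]; omega
              have hdrop1 : (pvPat PR K).drop 1 = p' := by rw [hP]; simp
              have hnst : ¬ (pvPat PR K).drop 1 <+: t := by
                rw [hdrop1]
                intro h'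
                exact hnK (by rw [hP, hc0]; exact List.cons_prefix_cons.2 ⟨rfl, h'⟩)
              have := pv_suffix_no_match PR hOK K hK f t (by simpa using hs) 1 le_rfl hlen2 hnst K
              rw [hdrop1] at this
              exact this hp'
        rw [hnp]
        simp only [Bool.false_eq_true, if_false]
        congr 1
        exact ih t (by simpa using hs)

theorem pv_chain_aux (PR : List (List Char × List Char)) (hOK : pvOK PR) (s : List Char) :
    ∀ (todo done : List (List Char × List Char)), PR = done ++ todo →
      todo.foldl (fun x pr => PySem.Chars.replace x pr.1 pr.2)
          (pvRender PR done.length (pvMark PR s.length s)) =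
        pvRender PR PR.length (pvMark PR s.length s) := by
  intro todo
  induction todo with
  | nil =>
    intro done ht
    simp only [List.foldl_nil]
    rw [ht]
    simp
  | cons pr rest ih =>
    intro done ht
    have hK : done.length < PR.length := by rw [ht]; simp only [List.length_append, List.length_cons]; omega
    have hgetD : PR.getD done.length ([], []) = pr := by
      rw [ht]
      simp [List.getD_eq_getElem?_getD]
    simp only [List.foldl_cons]
    rw [show PySem.Chars.replace (pvRender PR done.length (pvMark PR s.length s)) pr.1 pr.2 =
          pvRender PR (done.length + 1) (pvMark PR s.length s) by
      rw [← show pvPat PR done.length = pr.1 by simp only [pvPat]; rw [hgetD],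
          ← show pvRep PR done.length = pr.2 by simp only [pvRep]; rw [hgetD]]
      exact pv_render_step PR hOK done.length hK s.length s le_rfl]
    have := ih (done ++ [pr]) (by rw [ht]; simp)
    simpa using this

theorem pv_chain_eq_render (PR : List (List Char × List Char)) (hOK : pvOK PR) (s : List Char) :
    pvChain PR s = pvRender PR PR.length (pvMark PR s.length s) := by
  have := pv_chain_aux PR hOK s PR [] rfl
  simp only [List.length_nil] at this
  rw [pv_render_zero PR hOK s.length s le_rfl] at this
  exact this

theorem pv_scan_eq_render (PR : List (List Char × List Char)) (hOK : pvOK PR) :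
    ∀ f s, s.length ≤ f → pvScan PR f s = pvRender PR PR.length (pvMark PR f s) := by
  intro f
  induction f with
  | zero =>
    intro s hs
    have : s = [] := by cases s <;> simp_all
    subst this
    simp [pvScan, pvMark, pvRender_nil]
  | succ f ih =>
    intro s hs
    cases s with
    | nil => simp [pvScan, pvMark, pvRender_nil]
    | cons c t =>
      simp only [pvScan, pvMark]
      cases hfind : PR.findIdx? (fun pr => pr.1.isPrefixOf (c :: t)) with
      | some j =>
        obtain ⟨hj, hpj⟩ := pv_findIdx?_spec _ _ _ hfind
        have hlenj : 1 ≤ (pvPat PR j).length := by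
          have := (hOK j hj).1
          cases h' : pvPat PR j <;> simp_all
        simp only [pvRender_cons, pvRenderTok, if_pos hj]
        show pvRep PR j ++ pvScan PR f ((c :: t).drop (pvPat PR j).length) = _
        congr 1
        exact ih _ (by simp only [List.length_drop, List.length_cons] at hs ⊢; omega)
      | none =>
        simp only [pvRender_cons, pvRenderTok, List.singleton_append]
        rw [ih t (by simpa using hs)]

-- ---- instantiation ----

def pvOKb (PR : List (List Char × List Char)) : Bool :=
  (List.range PR.length).all fun i =>
    (!(pvPat PR i).isEmpty) &&
    ((List.range PR.length).all fun j =>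
      (decide (i = j) || (pvNoclash (pvPat PR i) (pvPat PR j) && pvNoclash (pvPat PR i) (pvRep PR j))) &&
      ((List.range (pvPat PR j).length).all fun k => decide (k = 0) || pvNoclash (pvPat PR i) ((pvPat PR j).drop k)) &&
      ((List.range (pvRep PR j).length).all fun k => decide (k = 0) || pvNoclash (pvPat PR i) ((pvRep PR j).drop k)) &&
      ((List.range (pvPat PR i).length).all fun k => decide (k = 0) ||
        (pvNoclash ((pvPat PR i).drop k) (pvPat PR j) && pvNoclash ((pvPat PR i).drop k) (pvRep PR j))))

theorem pv_ok_of_bool (PR : List (List Char × List Char)) (h : pvOKb PR = true) : pvOK PR := by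
  intro i hi
  simp only [pvOKb, List.all_eq_true, List.mem_range, Bool.and_eq_true, Bool.or_eq_true,
    decide_eq_true_eq, Bool.not_eq_true'] at h
  obtain ⟨h1, h2⟩ := h i hi
  refine ⟨by simpa [List.isEmpty_iff] using h1, ?_⟩
  intro j hj
  obtain ⟨⟨⟨ha, hb⟩, hc⟩, hd⟩ := h2 j hj
  refine ⟨?_, ?_, ?_, ?_⟩
  · intro hij
    rcases ha with h' | h'
    · exact absurd h' hij
    · exact h'
  · intro k hk hk1
    exact (hb k hk).resolve_left (by omega)
  · intro k hk hk1
    exact (hc k hk).resolve_left (by omega)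
  · intro k hk hk1
    exact (hd k hk).resolve_left (by omega)

theorem pvOK_pairs : ∀ p ∈ pvAssetPrefixes, pvOK (pvPairs p) := by
  intro p hp
  apply pv_ok_of_bool
  simp only [pvAssetPrefixes, List.mem_cons, List.not_mem_nil, or_false] at hp
  rcases hp with h | h | h | h | h | h <;> subst h <;> decide

set_option maxHeartbeats 1000000 in
theorem pv_A_step (pre html : String) :
    (let html := PySem.Str.replace html ("src=\"" ++ pre) ("src=\"../" ++ pre)
     let html := PySem.Str.replace html ("src='" ++ pre) ("src='../" ++ pre)
     let html := PySem.Str.replace html ("href=\"" ++ pre) ("href=\"../" ++ pre)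
     let html := PySem.Str.replace html ("href='" ++ pre) ("href='../" ++ pre)
     let html := PySem.Str.replace html ("url('" ++ pre) ("url('../" ++ pre)
     let html := PySem.Str.replace html ("url(\"" ++ pre) ("url(\"../" ++ pre)
     let html := PySem.Str.replace html ("url(" ++ pre) ("url(../" ++ pre)
     let html := PySem.Str.replace html ("srcset=\"" ++ pre) ("srcset=\"../" ++ pre)
     let html := PySem.Str.replace html ("srcset='" ++ pre) ("srcset='../" ++ pre)
     let html := PySem.Str.replace html ("poster=\"" ++ pre) ("poster=\"../" ++ pre)
     html).toList = pvChain (pvPairs pre) html.toList := by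
  simp only [pvChain, pvPairs, pvContexts, List.map_cons, List.map_nil, List.foldl_cons,
    List.foldl_nil]
  simp only [PySem.Str.toList_replace, String.toList_append,
    (by decide : "src=\"../".toList = "src=\"".toList ++ "../".toList),
    (by decide : "src='../".toList = "src='".toList ++ "../".toList),
    (by decide : "href=\"../".toList = "href=\"".toList ++ "../".toList),
    (by decide : "href='../".toList = "href='".toList ++ "../".toList),
    (by decide : "url('../".toList = "url('".toList ++ "../".toList),
    (by decide : "url(\"../".toList = "url(\"".toList ++ "../".toList),
    (by decide : "url(../".toList = "url(".toList ++ "../".toList),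
    (by decide : "srcset=\"../".toList = "srcset=\"".toList ++ "../".toList),
    (by decide : "srcset='../".toList = "srcset='".toList ++ "../".toList),
    (by decide : "poster=\"../".toList = "poster=\"".toList ++ "../".toList),
    List.append_assoc]

theorem pv_A_fold : ∀ (ps : List String) (html : String),
    (ps.foldl (fun html pre =>
      let html := PySem.Str.replace html ("src=\"" ++ pre) ("src=\"../" ++ pre)
      let html := PySem.Str.replace html ("src='" ++ pre) ("src='../" ++ pre)
      let html := PySem.Str.replace html ("href=\"" ++ pre) ("href=\"../" ++ pre)
      let html := PySem.Str.replace html ("href='" ++ pre) ("href='../" ++ pre)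
      let html := PySem.Str.replace html ("url('" ++ pre) ("url('../" ++ pre)
      let html := PySem.Str.replace html ("url(\"" ++ pre) ("url(\"../" ++ pre)
      let html := PySem.Str.replace html ("url(" ++ pre) ("url(../" ++ pre)
      let html := PySem.Str.replace html ("srcset=\"" ++ pre) ("srcset=\"../" ++ pre)
      let html := PySem.Str.replace html ("srcset='" ++ pre) ("srcset='../" ++ pre)
      let html := PySem.Str.replace html ("poster=\"" ++ pre) ("poster=\"../" ++ pre)
      html) html).toList =
      ps.foldl (fun cs p => pvChain (pvPairs p) cs) html.toList := by
  intro ps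
  induction ps with
  | nil => intro html; rfl
  | cons p ps ih =>
    intro html
    simp only [List.foldl_cons]
    rw [ih, pv_A_step p html]

theorem pv_A_toList (html : String) :
    (fix_asset_paths html).toList =
      pvAssetPrefixes.foldl (fun cs p => pvChain (pvPairs p) cs) html.toList := by
  unfold fix_asset_paths
  exact pv_A_fold pvAssetPrefixes html

theorem pv_chain_eq_scan (PR : List (List Char × List Char)) (hOK : pvOK PR) (s : List Char) :
    pvChain PR s = pvScan PR s.length s := by
  rw [pv_chain_eq_render PR hOK s, pv_scan_eq_render PR hOK s.length s le_rfl]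

-- ===== VERDICT (by name: the statement is the Claim_ definition above) =====
theorem fix_asset_paths_spec : Claim_equal_fix_asset_paths := by
  intro html _
  unfold Spec_fix_asset_paths fix_asset_paths_alt
  have h1 : (fix_asset_paths html).toList =
      pvAssetPrefixes.foldl (fun cs p => pvScan (pvPairs p) cs.length cs) html.toList := by
    rw [pv_A_toList]
    apply PySem.List.foldl_congr_mem
    intro cs p hp
    exact pv_chain_eq_scan (pvPairs p) (pvOK_pairs p hp) cs
  rw [← h1, String.ofList_toList]
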